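-- pv_equiv track=rewrite | github.com/zpysky1125/fp-tree | fp_tree.py | get_team_papers
-- ===== SOURCE A (Python) =====
-- def get_team_papers(author_topics, frequent_items_with_support_3):
--     res = []
--     for team in frequent_items_with_support_3:
--         inter_topics = set(author_topics[team[0]])
--         for team_member in team[1:]:
--             inter_topics.intersection_update(set(author_topics[team_member]))
--         res.append(inter_topics)
--     return res
-- ===== SOURCE B (Python) =====
-- def get_team_papers(author_topics, frequent_items_with_support_3):
--     res = []
--     for team in frequent_items_with_support_3:
--         counts = {}
--         for member in team:
--             for topic in dict.fromkeys(author_topics[member]):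
--                 counts[topic] = counts.get(topic, 0) + 1
--         res.append({t for t, c in counts.items() if c == len(team)})
--     return res
-- ===== Notes on version B (the rewrite author's own statement) =====
-- stated objective: alternative
-- what changed: Replaces the shrinking set-intersection accumulator with a count-and-filter table: one counter over all members' deduplicated topics, then keep exactly the topics whose count equals the team size.
import Mathlib
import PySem

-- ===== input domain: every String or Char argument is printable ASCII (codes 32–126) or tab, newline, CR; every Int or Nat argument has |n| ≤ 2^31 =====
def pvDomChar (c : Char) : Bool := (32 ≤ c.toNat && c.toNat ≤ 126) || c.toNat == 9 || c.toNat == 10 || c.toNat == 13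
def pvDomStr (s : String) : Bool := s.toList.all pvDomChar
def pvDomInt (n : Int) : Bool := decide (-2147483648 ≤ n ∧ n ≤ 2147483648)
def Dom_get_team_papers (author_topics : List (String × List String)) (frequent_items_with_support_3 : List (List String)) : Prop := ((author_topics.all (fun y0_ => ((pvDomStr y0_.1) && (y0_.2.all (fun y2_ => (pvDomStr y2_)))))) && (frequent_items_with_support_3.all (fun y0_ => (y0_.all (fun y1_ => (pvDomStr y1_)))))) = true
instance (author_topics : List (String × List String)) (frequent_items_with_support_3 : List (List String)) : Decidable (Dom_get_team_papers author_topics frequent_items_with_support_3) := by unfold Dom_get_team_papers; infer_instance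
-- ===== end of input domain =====

-- B replaces A's shrinking set-intersection accumulator with a count-and-filter table
-- (one counter over all members' deduplicated topics, keep topics counted len(team) times); alternative, not faster.

-- ===== PORT A =====
def get_team_papers (author_topics : List (String × List String)) (frequent_items_with_support_3 : List (List String)) : List (List String) :=
  let d := PySem.Dict.ofList author_topics
  frequent_items_with_support_3.foldl (fun res team =>
    -- inter_topics = set(author_topics[team[0]])  (Pre_ excludes empty teams / missing keys)
    let inter0 : PySem.Set String := PySem.Set.ofList (d.getD (PySem.List.pyGetD team 0 "") [])
    -- for team_member in team[1:]: inter_topics.intersection_update(set(author_topics[team_member]))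
    let inter := (PySem.List.slice team (some 1) none).foldl
        (fun s m => PySem.Set.inter s (PySem.Set.ofList (d.getD m []))) inter0
    res ++ [inter]) []

-- ===== PORT B =====
def get_team_papers_alt (author_topics : List (String × List String)) (frequent_items_with_support_3 : List (List String)) : List (List String) :=
  let d := PySem.Dict.ofList author_topics
  frequent_items_with_support_3.foldl (fun res team =>
    -- counts = {}; for member in team: for topic in dict.fromkeys(author_topics[member]): counts[topic] = counts.get(topic, 0) + 1
    let counts := team.foldl (fun c m =>
        (PySem.List.dedup (d.getD m [])).foldl (fun c t => c.modify t 0 (· + 1)) c)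
      (PySem.Dict.empty : PySem.Dict String Int)
    -- {t for t, c in counts.items() if c == len(team)}
    res ++ [PySem.Set.ofList ((counts.items.filter (fun p => p.2 == (team.length : Int))).map Prod.fst)]) []

-- ===== PRECONDITION & SPEC =====
-- Pre_ excludes exactly the inputs where the Python A raises: an empty team (IndexError on team[0])
-- or a team member that is not a key of author_topics (KeyError).
def Pre_get_team_papers (author_topics : List (String × List String)) (frequent_items_with_support_3 : List (List String)) : Prop :=
  frequent_items_with_support_3.all (fun team =>
    !team.isEmpty && team.all (fun m => (PySem.Dict.ofList author_topics).contains m)) = true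
instance (author_topics : List (String × List String)) (frequent_items_with_support_3 : List (List String)) : Decidable (Pre_get_team_papers author_topics frequent_items_with_support_3) := by unfold Pre_get_team_papers; infer_instance
def pvWitness_get_team_papers : (List (String × List String)) × List (List String) :=
  ([("a", ["x", "y"]), ("b", ["y", "z"])], [["a", "b"], ["a"]])

def Spec_get_team_papers (author_topics : List (String × List String)) (frequent_items_with_support_3 : List (List String)) (out : List (List String)) : Prop := out = get_team_papers_alt author_topics frequent_items_with_support_3
instance (author_topics : List (String × List String)) (frequent_items_with_support_3 : List (List String)) (out : List (List String)) : Decidable (Spec_get_team_papers author_topics frequent_items_with_support_3 out) := by unfold Spec_get_team_papers; infer_instance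

-- ===== CLAIM (what is proved, stated in full; the proofs are below) =====
def Claim_equal_get_team_papers : Prop := ∀ (author_topics : List (String × List String)) (frequent_items_with_support_3 : List (List String)), Dom_get_team_papers author_topics frequent_items_with_support_3 → Pre_get_team_papers author_topics frequent_items_with_support_3 → Spec_get_team_papers author_topics frequent_items_with_support_3 (get_team_papers author_topics frequent_items_with_support_3)

-- ===== LEMMAS AND PROOFS =====

theorem pyGetD_zero_cons (m : String) (rest : List String) (dflt : String) :
    PySem.List.pyGetD (m :: rest) 0 dflt = m := by
  simp [PySem.List.pyGetD, PySem.List.pyGet?, PySem.List.pyIdx?]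
theorem count_ofList (l : List String) (t : String) :
    (PySem.Set.ofList l).count t = if t ∈ l then 1 else 0 := by
  split
  · exact List.count_eq_one_of_mem (PySem.Set.nodup_ofList l) (by simpa [PySem.Set.mem_ofList] using ‹t ∈ l›)
  · exact List.count_eq_zero_of_not_mem (by simpa [PySem.Set.mem_ofList] using ‹t ∉ l›)

theorem count_flat (topics : String → List String) (rest : List String) (t : String) :
    (rest.flatMap (fun m => PySem.Set.ofList (topics m))).count t ≤ rest.length ∧
    ((rest.flatMap (fun m => PySem.Set.ofList (topics m))).count t = rest.length ↔
      ∀ m ∈ rest, t ∈ topics m) := by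
  induction rest with
  | nil => simp
  | cons m rs ih =>
    simp only [List.flatMap_cons, List.count_append, List.length_cons, count_ofList,
      List.mem_cons, forall_eq_or_imp]
    constructor
    · split <;> omega
    · constructor
      · intro h
        have hle := ih.1
        split at h
        · exact ⟨‹_›, ih.2.mp (by omega)⟩
        · omega
      · rintro ⟨h1, h2⟩
        have := ih.2.mpr h2
        simp [h1, this]
        omega

theorem inter_fold (topics : String → List String) (rest : List String) (s : List String) :
    rest.foldl (fun s m => PySem.Set.inter s (PySem.Set.ofList (topics m))) s
      = s.filter (fun t => rest.all (fun m => decide (t ∈ topics m))) := by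
  induction rest generalizing s with
  | nil => simp
  | cons m rs ih =>
    rw [List.foldl_cons, ih]
    show (PySem.Set.inter s (PySem.Set.ofList (topics m))).filter _ = _
    rw [PySem.Set.inter, List.filter_filter]
    apply List.filter_congr
    intro t _
    simp [PySem.Set.mem_ofList, Bool.and_comm]

theorem per_team (topics : String → List String) (m0 : String) (rest : List String) :
    rest.foldl (fun s m => PySem.Set.inter s (PySem.Set.ofList (topics m)))
        (PySem.Set.ofList (topics m0))
      = PySem.Set.ofList
          ((((PySem.Dict.counter ((m0 :: rest).flatMap (fun m => PySem.Set.ofList (topics m)))).items.filter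
              (fun p => p.2 == (((m0 :: rest).length : Nat) : Int))).map Prod.fst)) := by
  set L := (m0 :: rest).flatMap (fun m => PySem.Set.ofList (topics m)) with hL
  set L' := rest.flatMap (fun m => PySem.Set.ofList (topics m)) with hL'
  rw [PySem.Dict.items_counter, List.filter_map, List.map_map]
  have hmapfst : (Prod.fst ∘ fun k : String => (k, (L.count k : Int))) = id := rfl
  rw [hmapfst, List.map_id]
  have hsplit : PySem.Set.ofList L
      = PySem.Set.ofList (topics m0)
        ++ (PySem.Set.ofList L').filter (fun y => !(PySem.Set.ofList (topics m0)).contains y) := by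
    rw [hL, List.flatMap_cons, PySem.Set.ofList_append, PySem.Set.ofList_ofList,
      PySem.Set.update_eq_append_filter]
  rw [hsplit, List.filter_append]
  have h2 : ((PySem.Set.ofList L').filter (fun y => !(PySem.Set.ofList (topics m0)).contains y)).filter
      ((fun p => p.2 == (((m0 :: rest).length : Nat) : Int)) ∘ fun k => (k, (L.count k : Int))) = [] := by
    rw [List.filter_filter, List.filter_eq_nil_iff]
    intro y _
    simp only [Function.comp, Bool.and_eq_true, beq_iff_eq, Bool.not_eq_true',
      PySem.Set.contains_eq_listContains, List.contains_eq_mem, decide_eq_false_iff_not,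
      PySem.Set.mem_ofList, not_and]
    intro hcnt hnm
    have hc : L.count y = L'.count y := by
      rw [hL, List.flatMap_cons, List.count_append, count_ofList, if_neg hnm, hL']
      omega
    have hle := (count_flat topics rest y).1
    rw [← hL'] at hle
    simp only [List.length_cons] at hcnt
    have : L.count y = (m0 :: rest).length := by exact_mod_cast hcnt
    simp only [List.length_cons] at this
    omega
  rw [h2, List.append_nil, inter_fold]
  have hnod : ((PySem.Set.ofList (topics m0)).filter
      ((fun p => p.2 == (((m0 :: rest).length : Nat) : Int)) ∘ fun k => (k, (L.count k : Int)))).Nodup :=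
    List.Nodup.filter _ (PySem.Set.nodup_ofList _)
  rw [PySem.Set.ofList_eq_self_of_nodup _ hnod]
  apply List.filter_congr
  intro t ht
  have htm : t ∈ topics m0 := by simpa [PySem.Set.mem_ofList] using ht
  have hc : L.count t = 1 + L'.count t := by
    rw [hL, List.flatMap_cons, List.count_append, count_ofList, if_pos htm]
  have hcf := (count_flat topics rest t)
  rw [← hL'] at hcf
  rw [Bool.eq_iff_iff]
  simp only [Function.comp, beq_iff_eq, List.length_cons, List.all_eq_true, decide_eq_true_eq,
    Nat.cast_inj]
  constructor
  · intro h
    have := hcf.2.mpr h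
    omega
  · intro h
    exact hcf.2.mp (by omega)

-- ===== VERDICT (by name: the statement is the Claim_ definition above) =====
theorem get_team_papers_spec : Claim_equal_get_team_papers := by
  intro author_topics teams _ hpre
  unfold Spec_get_team_papers get_team_papers get_team_papers_alt
  simp only [PySem.List.foldl_append_singleton_eq_map, List.nil_append]
  apply List.map_congr_left
  intro team hteam
  unfold Pre_get_team_papers at hpre
  rw [List.all_eq_true] at hpre
  have hne : team ≠ [] := by
    have := hpre team hteam
    simp only [Bool.and_eq_true, Bool.not_eq_true'] at this
    simpa [List.isEmpty_iff] using this.1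
  obtain ⟨m0, rest, rfl⟩ := List.exists_cons_of_ne_nil hne
  rw [PySem.List.slice_from _ (by norm_num), pyGetD_zero_cons]
  simp only [Int.toNat_one, List.drop_succ_cons, List.drop_zero, PySem.List.dedup_eq_ofList]
  rw [← List.foldl_flatMap, ← PySem.Dict.counter_eq_foldl]
  exact per_team (fun m => (PySem.Dict.ofList author_topics).getD m []) m0 rest
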